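-- pv_equiv track=rewrite | github.com/eladman7/Text_Classification | pagetrainf8.py | find_word_in_path
-- ===== SOURCE A (Python) =====
-- def find_word_in_path(path, word, separator):
--     splitted_filename = path.split(separator)
--     i=0
--     index_of_patch = -1
--     for split in splitted_filename:
--         if word in split:
--             index_of_patch = i
--         i = i + 1
--     return index_of_patch
-- ===== SOURCE B (Python) =====
-- def find_word_in_path(path, word, separator):
--     segments = path.split(separator)
--     for i, segment in reversed(list(enumerate(segments))):
--         if word in segment:
--             return i
--     return -1
-- ===== Notes on version B (the rewrite author's own statement) =====
-- stated objective: simpler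
-- what changed: B scans the segments from last to first and returns the index of the first match it sees (early exit), instead of A's forward pass with a manual counter that keeps overwriting the last match.
import Mathlib
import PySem

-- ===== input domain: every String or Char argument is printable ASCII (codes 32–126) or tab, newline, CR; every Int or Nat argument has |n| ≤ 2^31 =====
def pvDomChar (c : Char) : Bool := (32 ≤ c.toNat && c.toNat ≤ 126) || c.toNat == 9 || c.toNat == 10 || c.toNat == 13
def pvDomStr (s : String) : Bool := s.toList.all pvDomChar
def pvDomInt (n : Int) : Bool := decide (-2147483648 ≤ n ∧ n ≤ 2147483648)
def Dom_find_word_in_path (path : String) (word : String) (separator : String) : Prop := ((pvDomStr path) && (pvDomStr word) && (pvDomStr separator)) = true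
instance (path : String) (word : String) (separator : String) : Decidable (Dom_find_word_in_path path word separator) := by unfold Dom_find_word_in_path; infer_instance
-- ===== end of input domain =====

-- B finds the last matching segment by scanning the split parts from the back with an
-- early exit, instead of A's forward pass overwriting a last-match accumulator (objective: simpler).


-- ===== PORT A =====
-- literal port of A: split, then a forward loop carrying (i, index_of_patch)
def find_word_in_path (path : String) (word : String) (separator : String) : Int :=
  -- path.split(separator): split? is none only for separator = "", which Pre_ excludes
  let splitted_filename := (PySem.Str.split? path separator).getD []
  (splitted_filename.foldl
    (fun (st : Int × Int) split =>
      (st.1 + 1, if PySem.Str.isIn word split then st.1 else st.2))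
    (0, -1)).2

-- ===== PORT B =====
-- first match in a (reversed) enumerated list, early exit; -1 if none
def fwipScan (word : String) : List (Int × String) → Int
  | [] => -1
  | (i, seg) :: rest => if PySem.Str.isIn word seg then i else fwipScan word rest

def find_word_in_path_alt (path : String) (word : String) (separator : String) : Int :=
  let segments := (PySem.Str.split? path separator).getD []
  fwipScan word (PySem.List.enumerate segments).reverse

-- ===== PRECONDITION & SPEC =====
-- Pre_ excludes only separator = "", on which Python's str.split raises ValueError.
def Pre_find_word_in_path (path : String) (word : String) (separator : String) : Prop :=
  separator ≠ ""
instance (path : String) (word : String) (separator : String) : Decidable (Pre_find_word_in_path path word separator) := by unfold Pre_find_word_in_path; infer_instance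

def pvWitness_find_word_in_path : String × String × String := ("a/b/ca", "a", "/")

def Spec_find_word_in_path (path : String) (word : String) (separator : String) (out : Int) : Prop := out = find_word_in_path_alt path word separator
instance (path : String) (word : String) (separator : String) (out : Int) : Decidable (Spec_find_word_in_path path word separator out) := by unfold Spec_find_word_in_path; infer_instance

-- ===== CLAIM (what is proved, stated in full; the proofs are below) =====
def Claim_equal_find_word_in_path : Prop := ∀ (path : String) (word : String) (separator : String), Dom_find_word_in_path path word separator → Pre_find_word_in_path path word separator → Spec_find_word_in_path path word separator (find_word_in_path path word separator)

-- ===== LEMMAS AND PROOFS =====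

-- backward scan with an explicit fallback (generalisation of fwipScan for the induction)
def fwipScanFB (word : String) (fb : Int) : List (Int × String) → Int
  | [] => fb
  | (i, seg) :: rest => if PySem.Str.isIn word seg then i else fwipScanFB word fb rest

theorem fwipScan_eq_FB (word : String) (l : List (Int × String)) :
    fwipScan word l = fwipScanFB word (-1) l := by
  induction l with
  | nil => rfl
  | cons p rest ih => cases p; simp [fwipScan, fwipScanFB, ih]

theorem fwipScanFB_append_single (word : String) (fb i : Int) (seg : String)
    (l : List (Int × String)) :
    fwipScanFB word fb (l ++ [(i, seg)]) =
      fwipScanFB word (if PySem.Str.isIn word seg then i else fb) l := by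
  induction l with
  | nil => rfl
  | cons p rest ih => cases p; simp [fwipScanFB, ih]

theorem fold_eq_scan (word : String) (segs : List String) (i0 idx0 : Int) :
    (segs.foldl
      (fun (st : Int × Int) split =>
        (st.1 + 1, if PySem.Str.isIn word split then st.1 else st.2))
      (i0, idx0)).2
    = fwipScanFB word idx0 (PySem.List.enumerate segs i0).reverse := by
  induction segs generalizing i0 idx0 with
  | nil => simp [PySem.List.enumerate_nil, fwipScanFB]
  | cons s rest ih =>
      simp only [List.foldl_cons, PySem.List.enumerate_cons, List.reverse_cons,
        fwipScanFB_append_single]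
      exact ih (i0 + 1) (if PySem.Str.isIn word s then i0 else idx0)

-- ===== VERDICT (by name: the statement is the Claim_ definition above) =====
theorem find_word_in_path_spec : Claim_equal_find_word_in_path := by
  intro path word separator _ _
  unfold Spec_find_word_in_path find_word_in_path find_word_in_path_alt
  simp only [fwipScan_eq_FB, fold_eq_scan]
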